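-- pv_equiv track=rewrite | github.com/nougat-rey/Vigenere-Cipher | vigenere_cipher.py | get_keystream
-- ===== SOURCE A (Python) =====
-- def get_keystream(key: str, msg_len: int) -> str:
--     keystream = ""
--     key_len = len(key)
--     quotient, remainder = divmod(msg_len, key_len)
--     times = 0
--     while times < quotient:
--         keystream+=key
--         times+=1
--     keystream+=key[0:remainder]
--     return keystream
-- ===== SOURCE B (Python) =====
-- def get_keystream(key: str, msg_len: int) -> str:
--     key_len = len(key)
--     return "".join(key[i % key_len] for i in range(msg_len))
-- ===== Notes on version B (the rewrite author's own statement) =====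
-- stated objective: idiomatic
-- what changed: Replaces A's divmod-then-concatenation-loop block construction with a single per-character pass that joins key[i % len(key)] for each index i in range(msg_len).
-- intended difference: For negative msg_len not a multiple of len(key), A returns a nonempty prefix of the key (divmod's floor quotient skips the loop but leaves a positive remainder slice) while B returns the empty string; a keystream of negative requested length is naturally empty, so B's value is the intended one. — e.g. on get_keystream("ab", -1): A returns "a", B returns ""
import Mathlib
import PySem

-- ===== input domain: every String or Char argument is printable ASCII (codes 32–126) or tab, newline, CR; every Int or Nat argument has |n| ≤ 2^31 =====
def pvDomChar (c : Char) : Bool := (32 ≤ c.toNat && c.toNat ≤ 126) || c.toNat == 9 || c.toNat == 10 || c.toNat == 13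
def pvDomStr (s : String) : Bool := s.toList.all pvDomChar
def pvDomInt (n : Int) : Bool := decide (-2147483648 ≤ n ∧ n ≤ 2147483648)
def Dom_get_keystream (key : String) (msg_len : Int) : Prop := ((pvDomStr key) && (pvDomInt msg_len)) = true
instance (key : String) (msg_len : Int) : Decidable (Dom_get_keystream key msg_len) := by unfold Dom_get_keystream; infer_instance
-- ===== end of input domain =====

-- B builds the keystream by per-character modular indexing (key[i % len(key)] for i in range(msg_len)) instead of A's divmod block-concatenation loop; on negative msg_len not a multiple of len(key) B returns "" where A returns a key prefix (stated as D_).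


-- ===== PORT A =====
-- the 'while times < quotient: keystream += key; times += 1' loop, step for step
def gkLoop (key acc : List Char) (quotient times : Int) : List Char :=
  if times < quotient then gkLoop key (acc ++ key) quotient (times + 1) else acc
termination_by (quotient - times).toNat
decreasing_by omega

def get_keystream (key : String) (msg_len : Int) : String :=
  match PySem.Int.divmod? msg_len (key.toList.length : Int) with
  | none => ""  -- key = "": Python raises ZeroDivisionError; excluded by Pre_
  | some (quotient, remainder) =>
      String.ofList (gkLoop key.toList [] quotient 0 ++ PySem.List.slice key.toList (some 0) (some remainder))

-- ===== PORT B =====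
-- ''.join(key[i % key_len] for i in range(msg_len)); pyGet? is some on every admitted input
def get_keystream_alt (key : String) (msg_len : Int) : String :=
  String.ofList ((PySem.List.pyRange 0 msg_len 1).filterMap
    (fun i => PySem.List.pyGet? key.toList (PySem.Int.mod i (key.toList.length : Int))))

-- ===== PRECONDITION & SPEC =====
-- Pre_ excludes only key = "", on which Python A raises ZeroDivisionError in divmod.
def Pre_get_keystream (key : String) (msg_len : Int) : Prop := key ≠ ""
instance (key : String) (msg_len : Int) : Decidable (Pre_get_keystream key msg_len) := by unfold Pre_get_keystream; infer_instance

def pvWitness_get_keystream : String × Int := ("key", 7)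

-- For negative msg_len not a multiple of len(key), A returns a nonempty prefix of the key while B returns "";
-- a keystream of negative requested length is naturally empty, so B's value is the intended one.
def D_get_keystream (key : String) (msg_len : Int) : Prop :=
  msg_len < 0 ∧ PySem.Int.mod msg_len (key.toList.length : Int) ≠ 0
instance (key : String) (msg_len : Int) : Decidable (D_get_keystream key msg_len) := by unfold D_get_keystream; infer_instance

def Spec_get_keystream (key : String) (msg_len : Int) (out : String) : Prop :=
  ¬ D_get_keystream key msg_len → out = get_keystream_alt key msg_len
instance (key : String) (msg_len : Int) (out : String) : Decidable (Spec_get_keystream key msg_len out) := by unfold Spec_get_keystream; infer_instance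

def pvDiffWitness_get_keystream : String × Int := ("ab", -1)
def pvDiffWitnessOut_get_keystream : String × String := ("a", "")

-- ===== CLAIM =====
def Claim_unchanged_get_keystream : Prop := ∀ (key : String) (msg_len : Int), Dom_get_keystream key msg_len → Pre_get_keystream key msg_len → Spec_get_keystream key msg_len (get_keystream key msg_len)
def Claim_changed_get_keystream : Prop := Dom_get_keystream (pvDiffWitness_get_keystream.1) (pvDiffWitness_get_keystream.2) ∧ Pre_get_keystream (pvDiffWitness_get_keystream.1) (pvDiffWitness_get_keystream.2) ∧ D_get_keystream (pvDiffWitness_get_keystream.1) (pvDiffWitness_get_keystream.2) ∧ get_keystream (pvDiffWitness_get_keystream.1) (pvDiffWitness_get_keystream.2) = pvDiffWitnessOut_get_keystream.1 ∧ get_keystream_alt (pvDiffWitness_get_keystream.1) (pvDiffWitness_get_keystream.2) = pvDiffWitnessOut_get_keystream.2 ∧ pvDiffWitnessOut_get_keystream.1 ≠ pvDiffWitnessOut_get_keystream.2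
def Claim_exact_get_keystream : Prop := ∀ (key : String) (msg_len : Int), Dom_get_keystream key msg_len → Pre_get_keystream key msg_len → D_get_keystream key msg_len → get_keystream key msg_len ≠ get_keystream_alt key msg_len

-- ===== LEMMAS AND PROOFS =====

theorem gkLoop_eq (key : List Char) : ∀ (n : Nat) (acc : List Char) (q t : Int),
    (q - t).toNat = n → gkLoop key acc q t = acc ++ (List.replicate n key).flatten := by
  intro n
  induction n with
  | zero =>
      intro acc q t h
      rw [gkLoop, if_neg (by omega)]
      simp
  | succ m ih =>
      intro acc q t h
      rw [gkLoop, if_pos (by omega)]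
      rw [ih (acc ++ key) q (t + 1) (by omega)]
      simp [List.replicate_succ]

-- closed description of A's output for nonempty key
theorem A_eq (key : String) (msg_len : Int) (h : key.toList ≠ []) :
    get_keystream key msg_len
      = String.ofList ((List.replicate (PySem.Int.floordiv msg_len key.toList.length).toNat key.toList).flatten
          ++ key.toList.take (PySem.Int.mod msg_len key.toList.length).toNat) := by
  have hL : 0 < key.toList.length := List.length_pos_iff.mpr h
  have hlen : (key.toList.length : Int) ≠ 0 := by exact_mod_cast hL.ne'
  have hr0 : 0 ≤ PySem.Int.mod msg_len (key.toList.length : Int) :=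
    PySem.Int.mod_nonneg msg_len (by exact_mod_cast hL)
  unfold get_keystream
  simp only [PySem.Int.divmod?, if_neg hlen]
  have e1 : msg_len.fdiv ((key.toList.length : Nat) : Int) = PySem.Int.floordiv msg_len ((key.toList.length : Nat) : Int) := rfl
  have e2 : msg_len.fmod ((key.toList.length : Nat) : Int) = PySem.Int.mod msg_len ((key.toList.length : Nat) : Int) := rfl
  rw [e1, e2]
  rw [gkLoop_eq key.toList (PySem.Int.floordiv msg_len (key.toList.length : Int)).toNat [] _ 0 (by omega)]
  have hr : PySem.Int.mod msg_len ((key.toList.length : Nat) : Int)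
      = (((PySem.Int.mod msg_len ((key.toList.length : Nat) : Int)).toNat : Nat) : Int) := by omega
  simp only [PySem.List.slice_zero_start]
  conv_lhs => rw [hr]
  rw [PySem.List.slice_to_natCast, List.nil_append]

theorem range_mod_eq (kl : List Char) (h : kl ≠ []) : ∀ (m : Nat),
    (List.range m).filterMap (fun k => kl[k % kl.length]?)
      = (List.replicate (m / kl.length) kl).flatten ++ kl.take (m % kl.length) := by
  have hL : 0 < kl.length := List.length_pos_iff.mpr h
  intro m
  induction m with
  | zero => simp [Nat.div_eq_of_lt hL, Nat.mod_eq_of_lt hL]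
  | succ m ih =>
      have hlt : m % kl.length < kl.length := Nat.mod_lt _ hL
      have hdm : kl.length * (m / kl.length) + m % kl.length = m := Nat.div_add_mod m kl.length
      rw [List.range_succ, List.filterMap_append, ih]
      have hget : List.filterMap (fun k => kl[k % kl.length]?) [m] = [kl[m % kl.length]] := by
        simp [List.getElem?_eq_getElem hlt]
      rw [hget]
      have hsucc : m + 1 = kl.length * (m / kl.length) + (m % kl.length + 1) := by omega
      have htake : kl.take (m % kl.length) ++ [kl[m % kl.length]] = kl.take (m % kl.length + 1) := by
        have := List.take_add_one (l := kl) (i := m % kl.length)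
        rw [List.getElem?_eq_getElem hlt] at this
        exact this.symm
      by_cases hc : m % kl.length + 1 = kl.length
      · have hdiv : (m + 1) / kl.length = m / kl.length + 1 := by
          rw [hsucc, hc, Nat.mul_add_div hL, Nat.div_self hL]
        have hmod : (m + 1) % kl.length = 0 := by
          rw [hsucc, hc, Nat.mul_add_mod, Nat.mod_self]
        rw [hdiv, hmod, List.append_assoc, htake, hc, List.take_length,
            List.replicate_succ', List.flatten_append]
        simp
      · have hlt2 : m % kl.length + 1 < kl.length := by omega
        have hdiv : (m + 1) / kl.length = m / kl.length := by
          rw [hsucc, Nat.mul_add_div hL, Nat.div_eq_of_lt hlt2]; omega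
        have hmod : (m + 1) % kl.length = m % kl.length + 1 := by
          rw [hsucc, Nat.mul_add_mod, Nat.mod_eq_of_lt hlt2]
        rw [hdiv, hmod, List.append_assoc, htake]

-- B's list form: filterMap over the range, with the modular index rewritten to a Nat index
theorem alt_list_eq (kl : List Char) (m : Nat) :
    (PySem.List.pyRange 0 (m : Int) 1).filterMap
        (fun i => PySem.List.pyGet? kl (PySem.Int.mod i (kl.length : Int)))
      = (List.range m).filterMap (fun k => kl[k % kl.length]?) := by
  rw [PySem.List.pyRange_one]
  have hcast : ((m : Int) - 0).toNat = m := by omega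
  rw [hcast, List.filterMap_map]
  apply List.filterMap_congr
  intro x hx
  have h1 : PySem.Int.mod ((0 : Int) + (x : Int)) (kl.length : Int) = ((x % kl.length : Nat) : Int) := by
    rw [Int.zero_add]
    exact PySem.Int.mod_natCast x kl.length
  simp only [Function.comp, h1, PySem.List.pyGet?_natCast]

theorem alt_empty (key : String) (msg_len : Int) (hneg : msg_len ≤ 0) :
    get_keystream_alt key msg_len = "" := by
  unfold get_keystream_alt
  rw [PySem.List.pyRange_one]
  have : ((msg_len : Int) - 0).toNat = 0 := by omega
  rw [this]
  rfl

-- ===== VERDICT =====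
theorem get_keystream_spec : Claim_unchanged_get_keystream := by
  intro key msg_len _ hpre hnd
  have hne : key.toList ≠ [] := fun hh => hpre (by simpa using congrArg String.ofList hh)
  have hL : 0 < key.toList.length := List.length_pos_iff.mpr hne
  rw [A_eq key msg_len hne]
  by_cases hm : 0 ≤ msg_len
  · obtain ⟨m, rfl⟩ : ∃ m : Nat, msg_len = (m : Int) := ⟨msg_len.toNat, by omega⟩
    unfold get_keystream_alt
    rw [alt_list_eq, range_mod_eq key.toList hne m]
    rw [PySem.Int.floordiv_natCast m key.toList.length, PySem.Int.mod_natCast m key.toList.length]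
    simp only [Int.toNat_natCast]
  · have hz : PySem.Int.mod msg_len (key.toList.length : Int) = 0 := by
      by_contra hnz
      exact hnd ⟨by omega, hnz⟩
    have hq : PySem.Int.floordiv msg_len (key.toList.length : Int) < 0 := by
      have hfm := PySem.Int.floordiv_mul_add_mod msg_len (key.toList.length : Int)
      rw [hz, add_zero] at hfm
      by_contra hge
      push Not at hge
      have : 0 ≤ PySem.Int.floordiv msg_len (key.toList.length : Int) * (key.toList.length : Int) :=
        mul_nonneg hge (by exact_mod_cast Nat.zero_le _)
      omega
    rw [alt_empty key msg_len (by omega), hz]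
    have : (PySem.Int.floordiv msg_len (key.toList.length : Int)).toNat = 0 := by omega
    rw [this]
    rfl

theorem get_keystream_changed : Claim_changed_get_keystream := by
  unfold Claim_changed_get_keystream
  refine ⟨by decide, by decide, by decide, ?_, by decide, by decide⟩
  show get_keystream "ab" (-1) = "a"
  rw [A_eq "ab" (-1) (by decide)]
  decide

theorem get_keystream_tight : Claim_exact_get_keystream := by
  intro key msg_len _ hpre hd
  obtain ⟨hneg, hnz⟩ := hd
  have hne : key.toList ≠ [] := fun hh => hpre (by simpa using congrArg String.ofList hh)
  have hL : 0 < key.toList.length := List.length_pos_iff.mpr hne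
  rw [A_eq key msg_len hne, alt_empty key msg_len (by omega)]
  intro hcontra
  have hlist := congrArg String.toList hcontra
  simp only [String.toList_ofList] at hlist
  have hr0 : 0 ≤ PySem.Int.mod msg_len (key.toList.length : Int) :=
    PySem.Int.mod_nonneg msg_len (by exact_mod_cast hL)
  have hq : PySem.Int.floordiv msg_len (key.toList.length : Int) < 0 := by
    have hfm := PySem.Int.floordiv_mul_add_mod msg_len (key.toList.length : Int)
    have hrlt : PySem.Int.mod msg_len (key.toList.length : Int) < (key.toList.length : Int) :=
      PySem.Int.mod_lt msg_len (by exact_mod_cast hL)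
    by_contra hge
    push Not at hge
    have : 0 ≤ PySem.Int.floordiv msg_len (key.toList.length : Int) * (key.toList.length : Int) :=
      mul_nonneg hge (by exact_mod_cast Nat.zero_le _)
    omega
  have hq0 : (PySem.Int.floordiv msg_len (key.toList.length : Int)).toNat = 0 := by omega
  rw [hq0] at hlist
  simp only [List.replicate, List.flatten_nil, List.nil_append] at hlist
  rcases List.take_eq_nil_iff.mp hlist with h1 | h1
  · omega
  · exact hne h1
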